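-- pv_equiv track=rewrite | github.com/AnatolyDomrachev/karantin | is28/garaev28/lab6/Zad4_16.py | chkword
-- ===== SOURCE A (Python) =====
-- def chkword (a,b):
--     ok=-1
--     if a[0:len(b)]!=b:
--         for i in range(0,len(a)):
--             if a[i]==' ':
--                 if a[i+1:i+1+len(b)]==b:
--                     ok=1
--                     break
--     else:
--         ok=1
--     return ok
-- ===== SOURCE B (Python) =====
-- def chkword(a, b):
--     # Streaming multi-candidate matcher: one left-to-right pass over a,
--     # maintaining the match lengths of all live word-start candidates.
--     n = len(b)
--     if n == 0:
--         return 1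
--     active = [0]  # start of string is a word start
--     for ch in a:
--         new = []
--         for k in active:
--             if ch == b[k]:
--                 if k + 1 == n:
--                     return 1
--                 new.append(k + 1)
--         if ch == ' ':
--             new.append(0)  # position after a space is a word start
--         active = new
--     return -1
-- ===== Notes on version B (the rewrite author's own statement) =====
-- stated objective: alternative
-- what changed: Replaced A's space-scan with repeated slice comparisons by a single left-to-right streaming pass over a that maintains the set of live partial-match lengths for all word-start candidates (a naive multi-pattern automaton), never slicing or re-reading a.
import Mathlib
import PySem

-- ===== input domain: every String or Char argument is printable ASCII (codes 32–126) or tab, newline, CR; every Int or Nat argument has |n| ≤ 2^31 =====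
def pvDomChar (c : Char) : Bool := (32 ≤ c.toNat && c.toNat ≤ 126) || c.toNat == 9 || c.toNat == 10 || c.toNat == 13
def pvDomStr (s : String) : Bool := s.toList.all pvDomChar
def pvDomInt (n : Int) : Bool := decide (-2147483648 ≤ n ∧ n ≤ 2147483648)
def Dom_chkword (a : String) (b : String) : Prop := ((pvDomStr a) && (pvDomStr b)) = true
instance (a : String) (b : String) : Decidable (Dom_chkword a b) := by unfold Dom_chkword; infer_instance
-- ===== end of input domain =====

-- B replaces A's space-scan-with-slices by one streaming pass maintaining all live word-start partial matches (alternative algorithm; return values proved equal).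


-- ===== PORT A =====
-- the 'for i in range(0, len(a))' loop with its break, over the remaining index list
def chkwordLoop (al bl : List Char) : List Int → Int
  | [] => -1
  | i :: rest =>
    if PySem.List.pyGet? al i = some ' ' then
      if PySem.List.slice al (some (i + 1)) (some (i + 1 + (bl.length : Int))) = bl then 1
      else chkwordLoop al bl rest
    else chkwordLoop al bl rest

def chkword (a : String) (b : String) : Int :=
  if PySem.List.slice a.toList (some 0) (some (b.toList.length : Int)) ≠ b.toList then
    chkwordLoop a.toList b.toList (PySem.List.pyRange 0 (a.toList.length : Int) 1)
  else 1

-- ===== PORT B =====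
-- inner 'for k in active' loop: none = the 'return 1' was taken, some new = the rebuilt candidate list
def chkInner (bl : List Char) (ch : Char) : List Nat → Option (List Nat)
  | [] => some []
  | k :: ks =>
    if PySem.List.pyGet? bl (k : Int) = some ch then
      if k + 1 = bl.length then none
      else match chkInner bl ch ks with
        | none => none
        | some new => some ((k + 1) :: new)
    else chkInner bl ch ks

-- outer 'for ch in a' loop carrying the active candidate list
def chkAltLoop (bl : List Char) : List Char → List Nat → Int
  | [], _ => -1
  | ch :: rest, active =>
    match chkInner bl ch active with
    | none => 1
    | some new => chkAltLoop bl rest (if ch = ' ' then new ++ [0] else new)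

def chkword_alt (a : String) (b : String) : Int :=
  if b.toList.length = 0 then 1
  else chkAltLoop b.toList a.toList [0]

-- ===== PRECONDITION & SPEC =====
def Spec_chkword (a : String) (b : String) (out : Int) : Prop := out = chkword_alt a b
instance (a : String) (b : String) (out : Int) : Decidable (Spec_chkword a b out) := by unfold Spec_chkword; infer_instance

-- ===== CLAIM (what is proved, stated in full; the proofs are below) =====
def Claim_equal_chkword : Prop := ∀ (a : String) (b : String), Dom_chkword a b → Spec_chkword a b (chkword a b)

-- ===== LEMMAS AND PROOFS =====

-- ---- A side: chkword = 1 iff bl is a prefix of al or ' '::bl is an infix of al ----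

def chkHit (al bl : List Char) (i : Int) : Bool :=
  (PySem.List.pyGet? al i == some ' ') &&
  (PySem.List.slice al (some (i + 1)) (some (i + 1 + (bl.length : Int))) == bl)

lemma chkwordLoop_eq_any (al bl : List Char) (is : List Int) :
    chkwordLoop al bl is = if is.any (chkHit al bl) then 1 else -1 := by
  induction is with
  | nil => simp [chkwordLoop]
  | cons i rest ih =>
      simp only [chkwordLoop, List.any_cons, chkHit]
      by_cases h1 : PySem.List.pyGet? al i = some ' ' <;>
        by_cases h2 : PySem.List.slice al (some (i + 1)) (some (i + 1 + (bl.length : Int))) = bl <;>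
        simp [h1, h2, ih]

lemma any_hit_iff (al bl : List Char) :
    (PySem.List.pyRange 0 (al.length : Int) 1).any (chkHit al bl) = true ↔
      (' ' :: bl) <:+: al := by
  rw [← PySem.Chars.isIn_iff_infix, ← PySem.Chars.exists_prefix_drop_iff_isIn]
  constructor
  · rintro h
    rcases List.any_eq_true.mp h with ⟨i, hmem, hhit⟩
    rcases (PySem.List.mem_pyRange_one).mp hmem with ⟨h0, hlt⟩
    obtain ⟨j, rfl⟩ : ∃ j : Nat, i = (j : Int) := ⟨i.toNat, (Int.toNat_of_nonneg h0).symm⟩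
    have hj : j < al.length := by exact_mod_cast hlt
    simp only [chkHit, Bool.and_eq_true, beq_iff_eq] at hhit
    obtain ⟨hget, hsl⟩ := hhit
    refine ⟨j, ?_⟩
    have hdrop : al[j] :: al.drop (j + 1) = al.drop j := List.getElem_cons_drop hj
    have hget' : al[j] = ' ' := by
      rw [PySem.List.pyGet?_natCast] at hget
      simpa [List.getElem?_eq_getElem hj] using hget
    have hsl' : (al.drop (j + 1)).take bl.length = bl := by
      have : PySem.List.slice al (some ((j : Int) + 1)) (some ((j : Int) + 1 + (bl.length : Int)))
          = (al.drop (j + 1)).take bl.length := by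
        have := PySem.List.slice_natCast_add al (j + 1) bl.length
        push_cast at this ⊢
        convert this using 3
      rwa [this] at hsl
    rw [← hdrop, hget']
    exact (List.cons_prefix_cons).mpr ⟨rfl, (List.prefix_iff_eq_take.mpr hsl'.symm)⟩
  · rintro ⟨j, hpre⟩
    have hj : j < al.length := by
      by_contra hge
      have : al.drop j = [] := List.drop_eq_nil_of_le (by omega)
      rw [this] at hpre
      exact absurd (List.prefix_nil.mp hpre) (by simp)
    refine List.any_eq_true.mpr ⟨(j : Int), ?_, ?_⟩
    · exact (PySem.List.mem_pyRange_one).mpr ⟨by positivity, by exact_mod_cast hj⟩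
    · have hdrop : al[j] :: al.drop (j + 1) = al.drop j := List.getElem_cons_drop hj
      rw [← hdrop] at hpre
      obtain ⟨hhead, htail⟩ := (List.cons_prefix_cons).mp hpre
      simp only [chkHit, Bool.and_eq_true, beq_iff_eq]
      constructor
      · rw [PySem.List.pyGet?_natCast, List.getElem?_eq_getElem hj, ← hhead]
      · have hsl : PySem.List.slice al (some ((j : Int) + 1)) (some ((j : Int) + 1 + (bl.length : Int)))
            = (al.drop (j + 1)).take bl.length := by
          have := PySem.List.slice_natCast_add al (j + 1) bl.length
          push_cast at this ⊢
          convert this using 3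
        rw [hsl]
        exact (List.prefix_iff_eq_take.mp htail).symm

lemma slice_zero_eq_iff (al bl : List Char) :
    PySem.List.slice al (some 0) (some (bl.length : Int)) = bl ↔ bl <+: al := by
  rw [PySem.List.slice_zero_start, PySem.List.slice_to_natCast]
  exact ⟨fun h => List.prefix_iff_eq_take.mpr h.symm, fun h => (List.prefix_iff_eq_take.mp h).symm⟩

lemma chkword_char (a b : String) :
    chkword a b = if b.toList <+: a.toList ∨ (' ' :: b.toList) <:+: a.toList then 1 else -1 := by
  unfold chkword
  by_cases hp : b.toList <+: a.toList
  · rw [if_neg (not_not.mpr ((slice_zero_eq_iff _ _).mpr hp)), if_pos (Or.inl hp)]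
  · rw [if_pos (fun h => hp ((slice_zero_eq_iff _ _).mp h)), chkwordLoop_eq_any]
    by_cases hin : (' ' :: b.toList) <:+: a.toList
    · rw [if_pos ((any_hit_iff _ _).mpr hin), if_pos (Or.inr hin)]
    · rw [if_neg (fun h => hin ((any_hit_iff _ _).mp h)), if_neg (by tauto)]

-- ---- B side: the streaming loop finds exactly the same matches ----

lemma chkInner_none_iff (bl : List Char) (ch : Char) (active : List Nat) :
    chkInner bl ch active = none ↔
      ∃ k ∈ active, bl[k]? = some ch ∧ k + 1 = bl.length := by
  induction active with
  | nil => simp [chkInner]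
  | cons k ks ih =>
      simp only [chkInner, PySem.List.pyGet?_natCast]
      by_cases h1 : bl[k]? = some ch
      · by_cases h2 : k + 1 = bl.length
        · simp [h1, h2]
        · rw [if_pos h1, if_neg h2]
          rcases hrec : chkInner bl ch ks with _ | new'
          · refine iff_of_true rfl ?_
            obtain ⟨x, hx, hc⟩ := ih.mp hrec
            exact ⟨x, List.mem_cons_of_mem _ hx, hc⟩
          · refine iff_of_false (by simp) ?_
            rintro ⟨x, hx, hc, hl⟩
            rcases List.mem_cons.mp hx with rfl | hx'
            · exact h2 hl
            · exact (by simp [hrec] : chkInner bl ch ks ≠ none) (ih.mpr ⟨x, hx', hc, hl⟩)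
      · simp [h1, ih]

lemma chkInner_some_mem (bl : List Char) (ch : Char) (active new : List Nat)
    (h : chkInner bl ch active = some new) :
    ∀ j, j ∈ new ↔ ∃ k ∈ active, j = k + 1 ∧ bl[k]? = some ch := by
  induction active generalizing new with
  | nil =>
      simp only [chkInner, Option.some.injEq] at h
      subst h
      simp
  | cons k ks ih =>
      simp only [chkInner, PySem.List.pyGet?_natCast] at h
      by_cases h1 : bl[k]? = some ch
      · by_cases h2 : k + 1 = bl.length
        · rw [if_pos h1, if_pos h2] at h; simp at h
        · rw [if_pos h1, if_neg h2] at h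
          rcases hrec : chkInner bl ch ks with _ | new'
          · simp [hrec] at h
          · simp only [hrec, Option.some.injEq] at h
            intro j
            subst h
            simp only [List.mem_cons, ih new' hrec j]
            constructor
            · rintro (rfl | ⟨x, hx1, hx2, hx3⟩)
              · exact ⟨k, Or.inl rfl, rfl, h1⟩
              · exact ⟨x, Or.inr hx1, hx2, hx3⟩
            · rintro ⟨x, hx1, hx2, hx3⟩
              rcases hx1 with rfl | hx1'
              · exact Or.inl hx2
              · exact Or.inr ⟨x, hx1', hx2, hx3⟩
      · rw [if_neg h1] at h
        intro j
        rw [ih new h j]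
        constructor
        · rintro ⟨x, hx1, hx2, hx3⟩
          exact ⟨x, List.mem_cons_of_mem _ hx1, hx2, hx3⟩
        · rintro ⟨x, hx1, hx2, hx3⟩
          rcases List.mem_cons.mp hx1 with rfl | hx1'
          · exact absurd hx3 h1
          · exact ⟨x, hx1', hx2, hx3⟩

-- survival of a candidate k on char ch: drop k of bl is a prefix of ch::rest iff bl[k] = ch
-- and (k+1 = n, i.e. done, or drop (k+1) prefix of rest)
lemma drop_prefix_cons (bl : List Char) (k : Nat) (hk : k < bl.length) (ch : Char) (rest : List Char) :
    (bl.drop k <+: ch :: rest) ↔ bl[k]? = some ch ∧ bl.drop (k + 1) <+: rest := by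
  rw [← List.getElem_cons_drop hk, List.cons_prefix_cons, List.getElem?_eq_getElem hk]
  constructor
  · rintro ⟨rfl, h⟩; exact ⟨rfl, h⟩
  · rintro ⟨h, h2⟩; exact ⟨by injection h, h2⟩

-- main invariant for the outer loop
lemma chkAltLoop_char (bl : List Char) (hbl : bl ≠ []) (al : List Char) :
    ∀ active : List Nat,
    chkAltLoop bl al active =
      if (∃ k ∈ active, k < bl.length ∧ bl.drop k <+: al) ∨ (' ' :: bl) <:+: al
      then 1 else -1 := by
  induction al with
  | nil =>
      intro active
      simp only [chkAltLoop]
      rw [if_neg]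
      rintro (⟨k, _, hk, hpre⟩ | hin)
      · have : bl.drop k = [] := List.prefix_nil.mp hpre
        rw [List.drop_eq_nil_iff] at this; omega
      · simp at hin
  | cons ch rest ih =>
      intro active
      simp only [chkAltLoop]
      rcases hstep : chkInner bl ch active with _ | new
      · -- found: ∃ k ∈ active with bl[k] = ch and k+1 = length
        rw [if_pos]
        left
        rcases (chkInner_none_iff bl ch active).mp hstep with ⟨k, hmem, hget, hlen⟩
        refine ⟨k, hmem, by omega, ?_⟩
        rw [drop_prefix_cons bl k (by omega) ch rest]
        exact ⟨hget, by rw [hlen]; simp⟩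
      · show chkAltLoop bl rest (if ch = ' ' then new ++ [0] else new) = _
        rw [ih]
        congr 1
        simp only [eq_iff_iff]
        have hmemnew := chkInner_some_mem bl ch active new hstep
        have hnotdone : ¬ ∃ k ∈ active, bl[k]? = some ch ∧ k + 1 = bl.length := by
          rw [← chkInner_none_iff bl ch active, hstep]; simp
        constructor
        · rintro (⟨j, hj, hjlt, hjpre⟩ | hin)
          · -- j came from new (or the appended 0 for a space)
            by_cases hsp : ch = ' '
            · rw [if_pos hsp] at hj
              rcases List.mem_append.mp hj with hj | hj0
              · rcases (hmemnew j).mp hj with ⟨k, hk, rfl, hget⟩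
                left
                exact ⟨k, hk, by omega, (drop_prefix_cons bl k (by omega) ch rest).mpr ⟨hget, hjpre⟩⟩
              · -- j = 0: b starts right after this space: ' '::bl infix of ch::rest
                have : j = 0 := by simpa using hj0
                subst this
                right
                obtain ⟨t, ht⟩ := (by simpa using hjpre : bl <+: rest)
                refine ⟨[], t, ?_⟩
                simp [hsp, ht]
            · rw [if_neg hsp] at hj
              rcases (hmemnew j).mp hj with ⟨k, hk, rfl, hget⟩
              left
              exact ⟨k, hk, by omega, (drop_prefix_cons bl k (by omega) ch rest).mpr ⟨hget, hjpre⟩⟩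
          · -- infix of rest ⇒ infix of ch::rest
            right
            rcases hin with ⟨s, t, hst⟩
            exact ⟨ch :: s, t, by rw [← hst]; simp⟩
        · rintro (⟨k, hk, hklt, hkpre⟩ | hin)
          · -- candidate k survived consuming ch
            rcases (drop_prefix_cons bl k hklt ch rest).mp hkpre with ⟨hget, hrest⟩
            have hk1 : k + 1 ≠ bl.length := fun h => hnotdone ⟨k, hk, hget, h⟩
            left
            refine ⟨k + 1, ?_, by omega, hrest⟩
            have : k + 1 ∈ new := (hmemnew (k + 1)).mpr ⟨k, hk, rfl, hget⟩
            split <;> simp [this]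
          · -- ' '::bl infix of ch::rest: either starts here (ch=' ') or inside rest
            rcases hin with ⟨s, t, hst⟩
            rcases s with _ | ⟨c, s'⟩
            · -- starts at head: ch = ' ' and bl <+: rest
              simp only [List.nil_append, List.cons_append, List.cons.injEq] at hst
              obtain ⟨hch, hrest⟩ := hst
              left
              refine ⟨0, ?_, List.length_pos_iff.mpr hbl, by simpa using (⟨t, hrest⟩ : bl <+: rest)⟩
              rw [if_pos hch.symm]; simp
            · -- inside rest
              simp only [List.cons_append, List.append_assoc, List.cons.injEq] at hst
              refine Or.inr ⟨s', t, ?_⟩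
              simpa [List.append_assoc] using hst.2

lemma chkword_alt_char (a b : String) :
    chkword_alt a b = if b.toList <+: a.toList ∨ (' ' :: b.toList) <:+: a.toList then 1 else -1 := by
  unfold chkword_alt
  by_cases hb : b.toList.length = 0
  · have : b.toList = [] := List.length_eq_zero_iff.mp hb
    rw [if_pos hb, if_pos (Or.inl (by rw [this]; exact List.nil_prefix))]
  · rw [if_neg hb, chkAltLoop_char b.toList (fun h => hb (by rw [h]; rfl)) a.toList [0]]
    congr 1
    simp only [eq_iff_iff]
    constructor
    · rintro (⟨k, hk, _, hpre⟩ | hin)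
      · have : k = 0 := by simpa using hk
        subst this
        exact Or.inl (by simpa using hpre)
      · exact Or.inr hin
    · rintro (hpre | hin)
      · exact Or.inl ⟨0, by simp, by omega, by simpa using hpre⟩
      · exact Or.inr hin

-- ===== VERDICT (by name: the statement is the Claim_ definition above) =====
theorem chkword_spec : Claim_equal_chkword := by
  intro a b _
  unfold Spec_chkword
  rw [chkword_char, chkword_alt_char]
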